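-- pv_equiv track=rewrite | github.com/EricRobertBrewer/litbank-entities | litbank_entities/linguistics.py | process
-- ===== SOURCE A (Python) =====
-- from typing import List, Optional
--
-- _EXCLUDE_TOKENS_DEFAULT = {'_'}
--
-- _CHAR_TO_NORMAL_DEFAULT = {digit: '#' for digit in '0123456789'}
--
-- def process(
--         sentence_tokens: List[List[str]],
--         sentence_labels: List[List[List[str]]],
--         exclude_tokens: Optional[set] = None,
--         char_to_normal: Optional[dict] = None,
-- ):
--     """
--     Remove formatting tokens (underscores) and normalize special characters (diacritics).
--
--     :param sentence_tokens: Tokens per sentence.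
--     :param sentence_labels: Labels per sentence.
--     :param exclude_tokens: Set of tokens to discard. Default is underscore (denotes italics).
--     :param char_to_normal: Dict from single characters to normalized strings.
--     :return:
--     """
--     if exclude_tokens is None:
--         exclude_tokens = _EXCLUDE_TOKENS_DEFAULT
--     if char_to_normal is None:
--         char_to_normal = _CHAR_TO_NORMAL_DEFAULT
--
--     # Pre-process; remove excluded tokens (underscores) and normalize characters.
--     sentence_tokens_, sentence_labels_ = list(), list()
--     for i, tokens in enumerate(sentence_tokens):
--         tokens_, labels_ = list(), list()
--         for j, token in enumerate(tokens):
--             if token in exclude_tokens: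
--                 continue
--             tokens_.append(_pre_process_token(token, char_to_normal))
--             labels_.append(sentence_labels[i][j])
--         sentence_tokens_.append(tokens_)
--         sentence_labels_.append(labels_)
--
--     return sentence_tokens_, sentence_labels_
--
-- def _pre_process_token(token: str, char_to_normal: dict):
--     token = ''.join(char_to_normal[c] if c in char_to_normal.keys() else c for c in token)
--     return token
-- ===== SOURCE B (Python) =====
-- _EXCLUDE_TOKENS_DEFAULT = {'_'}
--
-- _CHAR_TO_NORMAL_DEFAULT = {digit: '#' for digit in '0123456789'}
--
--
-- def process(sentence_tokens, sentence_labels, exclude_tokens=None, char_to_normal=None):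
--     exclude = _EXCLUDE_TOKENS_DEFAULT if exclude_tokens is None else exclude_tokens
--     cmap = _CHAR_TO_NORMAL_DEFAULT if char_to_normal is None else char_to_normal
--     # Pass 1: build a normalization cache over the DISTINCT kept tokens, so each
--     # distinct token's character-level normalization is computed exactly once.
--     memo = {}
--     for tokens in sentence_tokens:
--         for token in tokens:
--             if token not in exclude and token not in memo:
--                 memo[token] = ''.join([cmap.get(c, c) for c in token])
--     # Pass 2: emit the rows by cache lookup.
--     out_tokens, out_labels = [], []
--     for i, tokens in enumerate(sentence_tokens):
--         out_tokens.append([memo[t] for t in tokens if t not in exclude])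
--         out_labels.append([sentence_labels[i][j]
--                            for j, t in enumerate(tokens) if t not in exclude])
--     return out_tokens, out_labels
-- ===== Notes on version B (the rewrite author's own statement) =====
-- stated objective: alternative
-- what changed: B is a staged two-pass algorithm: a first pass builds a hash cache mapping each DISTINCT kept token to its normalized form (character work done once per distinct token), and a second pass assembles the output rows purely by cache lookups and index-paired label comprehensions, instead of A's single nested loop that re-normalizes every token occurrence while appending.
import Mathlib
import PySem

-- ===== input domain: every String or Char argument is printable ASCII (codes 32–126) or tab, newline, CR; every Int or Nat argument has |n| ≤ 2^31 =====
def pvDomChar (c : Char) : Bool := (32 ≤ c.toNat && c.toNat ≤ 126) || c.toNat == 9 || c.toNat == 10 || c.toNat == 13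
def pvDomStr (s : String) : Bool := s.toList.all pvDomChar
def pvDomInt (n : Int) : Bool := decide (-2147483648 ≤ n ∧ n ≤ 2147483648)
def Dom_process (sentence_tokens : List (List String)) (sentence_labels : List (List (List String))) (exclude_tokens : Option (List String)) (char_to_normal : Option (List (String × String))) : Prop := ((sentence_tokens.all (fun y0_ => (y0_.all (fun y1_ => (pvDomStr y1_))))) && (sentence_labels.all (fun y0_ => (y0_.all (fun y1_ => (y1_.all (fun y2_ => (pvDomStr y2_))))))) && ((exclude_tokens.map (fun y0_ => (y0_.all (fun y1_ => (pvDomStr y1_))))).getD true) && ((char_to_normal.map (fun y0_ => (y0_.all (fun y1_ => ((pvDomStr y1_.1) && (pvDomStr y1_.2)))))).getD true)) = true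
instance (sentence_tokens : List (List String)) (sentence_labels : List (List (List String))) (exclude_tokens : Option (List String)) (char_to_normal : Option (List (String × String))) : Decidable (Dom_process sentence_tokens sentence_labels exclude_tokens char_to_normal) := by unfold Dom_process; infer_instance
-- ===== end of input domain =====

-- B is a staged two-pass re-implementation: pass 1 builds a cache from each DISTINCT kept
-- token to its normalized form, pass 2 assembles rows by cache lookup (objective: alternative).

-- the Python 1-char string holding c
def pvCharStr (c : Char) : String := String.ofList [c]

-- sentence_labels[i][j] (both Pythons write exactly this subscript; Pre_ keeps it in range)
def pvLabelAt (sentence_labels : List (List (List String))) (i j : Int) : List String :=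
  (PySem.List.pyGet? ((PySem.List.pyGet? sentence_labels i).getD []) j).getD []

-- ===== PORT A =====
-- _CHAR_TO_NORMAL_DEFAULT = {digit: '#' for digit in '0123456789'}
def pvDefaultCmap : List (String × String) :=
  [("0", "#"), ("1", "#"), ("2", "#"), ("3", "#"), ("4", "#"),
   ("5", "#"), ("6", "#"), ("7", "#"), ("8", "#"), ("9", "#")]

-- _pre_process_token: per character, 'char_to_normal[c] if c in char_to_normal.keys() else c'
def pvPreProcessToken (token : String) (cmap : List (String × String)) : String :=
  PySem.Str.join "" (token.toList.map (fun c =>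
    if (PySem.Dict.mk cmap).contains (pvCharStr c) then
      ((PySem.Dict.mk cmap).get? (pvCharStr c)).getD (pvCharStr c)
    else pvCharStr c))

def process (sentence_tokens : List (List String)) (sentence_labels : List (List (List String))) (exclude_tokens : Option (List String)) (char_to_normal : Option (List (String × String))) : List (List String) × List (List (List String)) :=
  let exclude : List String := match exclude_tokens with | none => ["_"] | some s => s
  let cmap : List (String × String) := match char_to_normal with | none => pvDefaultCmap | some d => d
  (PySem.List.enumerate sentence_tokens).foldl
    (fun (acc : List (List String) × List (List (List String))) p =>
      let inner :=
        (PySem.List.enumerate p.2).foldl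
          (fun (tl : List String × List (List String)) q =>
            if exclude.contains q.2 then tl
            else (tl.1 ++ [pvPreProcessToken q.2 cmap], tl.2 ++ [pvLabelAt sentence_labels p.1 q.1]))
          ([], [])
      (acc.1 ++ [inner.1], acc.2 ++ [inner.2]))
    ([], [])

-- ===== PORT B =====
-- ''.join([cmap.get(c, c) for c in token])
def pvNormToken (token : String) (cmap : List (String × String)) : String :=
  PySem.Str.join "" (token.toList.map (fun c =>
    ((PySem.Dict.mk cmap).get? (pvCharStr c)).getD (pvCharStr c)))

-- pass 1: 'for tokens in sentence_tokens: for token in tokens: if token not in exclude and token not in memo: memo[token] = …'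
def pvMemoStep (exclude : List String) (cmap : List (String × String))
    (m : PySem.Dict String String) (token : String) : PySem.Dict String String :=
  if !exclude.contains token && !m.contains token then
    m.insert token (pvNormToken token cmap)
  else m

def pvMemoRow (exclude : List String) (cmap : List (String × String))
    (m : PySem.Dict String String) (tokens : List String) : PySem.Dict String String :=
  tokens.foldl (pvMemoStep exclude cmap) m

def pvMemo (sentence_tokens : List (List String)) (exclude : List String) (cmap : List (String × String)) : PySem.Dict String String :=
  sentence_tokens.foldl (pvMemoRow exclude cmap) PySem.Dict.empty

def process_alt (sentence_tokens : List (List String)) (sentence_labels : List (List (List String))) (exclude_tokens : Option (List String)) (char_to_normal : Option (List (String × String))) : List (List String) × List (List (List String)) :=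
  let exclude : List String := match exclude_tokens with | none => ["_"] | some s => s
  let cmap : List (String × String) := match char_to_normal with | none => pvDefaultCmap | some d => d
  let memo := pvMemo sentence_tokens exclude cmap
  -- pass 2; 'memo[t]' never misses for a kept token, ported as get? with a dummy default
  (PySem.List.enumerate sentence_tokens).foldl
    (fun (acc : List (List String) × List (List (List String))) p =>
      (acc.1 ++ [(p.2.filter (fun t => !exclude.contains t)).map (fun t => (memo.get? t).getD "")],
       acc.2 ++ [((PySem.List.enumerate p.2).filter (fun q => !exclude.contains q.2)).map
                   (fun q => pvLabelAt sentence_labels p.1 q.1)]))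
    ([], [])

-- ===== PRECONDITION & SPEC =====
-- Pre_ excludes exactly the inputs where sentence_labels[i][j] raises IndexError for some
-- kept token (both A and B raise there).
def Pre_process (sentence_tokens : List (List String)) (sentence_labels : List (List (List String))) (exclude_tokens : Option (List String)) (char_to_normal : Option (List (String × String))) : Prop :=
  ∀ i ∈ List.range sentence_tokens.length,
    ∀ j ∈ List.range (sentence_tokens.getD i []).length,
      ¬ (exclude_tokens.getD ["_"]).contains ((sentence_tokens.getD i []).getD j "") →
      i < sentence_labels.length ∧ j < (sentence_labels.getD i []).length
instance (sentence_tokens : List (List String)) (sentence_labels : List (List (List String))) (exclude_tokens : Option (List String)) (char_to_normal : Option (List (String × String))) : Decidable (Pre_process sentence_tokens sentence_labels exclude_tokens char_to_normal) := by unfold Pre_process; infer_instance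

def pvWitness_process : List (List String) × List (List (List String)) × Option (List String) × (Option (List (String × String))) :=
  ([["_", "a1"]], [[["O"], ["B-PER"]]], none, none)

def Spec_process (sentence_tokens : List (List String)) (sentence_labels : List (List (List String))) (exclude_tokens : Option (List String)) (char_to_normal : Option (List (String × String))) (out : List (List String) × List (List (List String))) : Prop := out = process_alt sentence_tokens sentence_labels exclude_tokens char_to_normal
instance (sentence_tokens : List (List String)) (sentence_labels : List (List (List String))) (exclude_tokens : Option (List String)) (char_to_normal : Option (List (String × String))) (out : List (List String) × List (List (List String))) : Decidable (Spec_process sentence_tokens sentence_labels exclude_tokens char_to_normal out) := by unfold Spec_process; infer_instance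

-- ===== CLAIM =====
def Claim_equal_process : Prop := ∀ (sentence_tokens : List (List String)) (sentence_labels : List (List (List String))) (exclude_tokens : Option (List String)) (char_to_normal : Option (List (String × String))), Dom_process sentence_tokens sentence_labels exclude_tokens char_to_normal → Pre_process sentence_tokens sentence_labels exclude_tokens char_to_normal → Spec_process sentence_tokens sentence_labels exclude_tokens char_to_normal (process sentence_tokens sentence_labels exclude_tokens char_to_normal)

-- ===== LEMMAS AND PROOFS =====

-- A's per-character 'if c in keys: d[c] else c' is exactly a lookup with default
theorem pvPreProcess_eq_norm (token : String) (cmap : List (String × String)) :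
    pvPreProcessToken token cmap = pvNormToken token cmap := by
  unfold pvPreProcessToken pvNormToken
  congr 1
  apply List.map_congr_left
  intro c _
  rw [PySem.Dict.contains_eq_isSome_get?]
  cases (PySem.Dict.mk cmap).get? (pvCharStr c) <;> simp

-- invariant: every value stored in the memo is the normalization of its key
def pvMemoInv (cmap : List (String × String)) (m : PySem.Dict String String) : Prop :=
  ∀ t v, m.get? t = some v → v = pvNormToken t cmap

theorem pvMemo_step_inv (exclude : List String) (cmap : List (String × String))
    (m : PySem.Dict String String) (token : String) (h : pvMemoInv cmap m) :
    pvMemoInv cmap (pvMemoStep exclude cmap m token) := by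
  unfold pvMemoStep
  split_ifs with hc
  · intro t v hv
    rw [PySem.Dict.get?_insert] at hv
    split_ifs at hv with ht
    · cases hv; subst ht; rfl
    · exact h t v hv
  · exact h

theorem pvMemo_row_inv (exclude : List String) (cmap : List (String × String))
    (tokens : List String) (m : PySem.Dict String String) (h : pvMemoInv cmap m) :
    pvMemoInv cmap (pvMemoRow exclude cmap m tokens) := by
  unfold pvMemoRow
  induction tokens generalizing m with
  | nil => exact h
  | cons a l ih => exact ih _ (pvMemo_step_inv exclude cmap m a h)

theorem pvMemo_step_mono (exclude : List String) (cmap : List (String × String))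
    (m : PySem.Dict String String) (token t : String) (h : m.contains t = true) :
    (pvMemoStep exclude cmap m token).contains t = true := by
  unfold pvMemoStep
  split_ifs with hc
  · rw [PySem.Dict.contains_insert]; simp [h]
  · exact h

theorem pvMemo_row_mono (exclude : List String) (cmap : List (String × String))
    (tokens : List String) (m : PySem.Dict String String) (t : String)
    (h : m.contains t = true) :
    (pvMemoRow exclude cmap m tokens).contains t = true := by
  unfold pvMemoRow
  induction tokens generalizing m with
  | nil => exact h
  | cons a l ih => exact ih _ (pvMemo_step_mono exclude cmap m a t h)

theorem pvMemo_rows_mono (exclude : List String) (cmap : List (String × String))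
    (rows : List (List String)) (m : PySem.Dict String String) (t : String)
    (h : m.contains t = true) :
    (rows.foldl (pvMemoRow exclude cmap) m).contains t = true := by
  induction rows generalizing m with
  | nil => exact h
  | cons r rs ih => exact ih _ (pvMemo_row_mono exclude cmap r m t h)

theorem pvMemo_row_covers (exclude : List String) (cmap : List (String × String))
    (tokens : List String) (m : PySem.Dict String String) (t : String)
    (ht : t ∈ tokens) (hk : exclude.contains t = false) :
    (pvMemoRow exclude cmap m tokens).contains t = true := by
  unfold pvMemoRow
  induction tokens generalizing m with
  | nil => cases ht
  | cons a l ih =>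
    rw [List.foldl_cons]
    rcases List.mem_cons.mp ht with rfl | hmem
    · apply pvMemo_row_mono
      unfold pvMemoStep
      split_ifs with hc
      · exact PySem.Dict.contains_insert_self _ _ _
      · rw [hk] at hc; simpa using hc
    · exact ih _ hmem

theorem pvMemo_rows_inv (exclude : List String) (cmap : List (String × String))
    (rows : List (List String)) (m : PySem.Dict String String) (h : pvMemoInv cmap m) :
    pvMemoInv cmap (rows.foldl (pvMemoRow exclude cmap) m) := by
  induction rows generalizing m with
  | nil => exact h
  | cons r rs ih => exact ih _ (pvMemo_row_inv exclude cmap r m h)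

theorem pvMemo_rows_covers (exclude : List String) (cmap : List (String × String))
    (rows : List (List String)) (m : PySem.Dict String String)
    (tokens : List String) (t : String)
    (hrow : tokens ∈ rows) (ht : t ∈ tokens) (hk : exclude.contains t = false) :
    (rows.foldl (pvMemoRow exclude cmap) m).contains t = true := by
  induction rows generalizing m with
  | nil => cases hrow
  | cons r rs ih =>
    rw [List.foldl_cons]
    rcases List.mem_cons.mp hrow with rfl | hmem
    · exact pvMemo_rows_mono exclude cmap rs _ t (pvMemo_row_covers exclude cmap tokens m t ht hk)
    · exact ih _ hmem

-- every kept token occurring anywhere in sentence_tokens is cached with its normalization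
theorem pvMemo_get? (sentence_tokens : List (List String)) (exclude : List String)
    (cmap : List (String × String)) (tokens : List String) (t : String)
    (hrow : tokens ∈ sentence_tokens) (ht : t ∈ tokens) (hk : exclude.contains t = false) :
    (pvMemo sentence_tokens exclude cmap).get? t = some (pvNormToken t cmap) := by
  have he : pvMemoInv cmap (PySem.Dict.empty : PySem.Dict String String) := by
    intro t v hv; simp [PySem.Dict.get?_empty] at hv
  have hinv : pvMemoInv cmap (pvMemo sentence_tokens exclude cmap) :=
    pvMemo_rows_inv exclude cmap sentence_tokens PySem.Dict.empty he
  have hcont : (pvMemo sentence_tokens exclude cmap).contains t = true :=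
    pvMemo_rows_covers exclude cmap sentence_tokens PySem.Dict.empty tokens t hrow ht hk
  rw [PySem.Dict.contains_eq_isSome_get?] at hcont
  obtain ⟨v, hv⟩ := Option.isSome_iff_exists.mp hcont
  rw [hv, hinv t v hv]

-- filtering an enumerate on the element and dropping the index is filtering the list
theorem pvFilter_enumerate_map (l : List String) (s : Int) (p : String → Bool)
    (g : String → String) :
    (((PySem.List.enumerate l s).filter (fun q => p q.2)).map (fun q => g q.2))
      = (l.filter p).map g := by
  induction l generalizing s with
  | nil => simp [PySem.List.enumerate_nil]
  | cons a l ih =>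
    rw [PySem.List.enumerate_cons, List.filter_cons]
    by_cases hp : p a
    · simp [hp, ih]
    · simp [hp, ih]

-- A's inner append loop over one sentence, split into its two accumulators
theorem pvRowA_eq (exclude : List String) (cmap : List (String × String))
    (sl : List (List (List String))) (i : Int) (tokens : List String) :
    (PySem.List.enumerate tokens).foldl
      (fun (tl : List String × List (List String)) q =>
        if exclude.contains q.2 then tl
        else (tl.1 ++ [pvPreProcessToken q.2 cmap], tl.2 ++ [pvLabelAt sl i q.1]))
      ([], [])
    = ((((PySem.List.enumerate tokens).filter (fun q => !exclude.contains q.2)).map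
          (fun q => pvPreProcessToken q.2 cmap)),
       (((PySem.List.enumerate tokens).filter (fun q => !exclude.contains q.2)).map
          (fun q => pvLabelAt sl i q.1))) := by
  have h1 : (PySem.List.enumerate tokens).foldl
      (fun (tl : List String × List (List String)) q =>
        if exclude.contains q.2 then tl
        else (tl.1 ++ [pvPreProcessToken q.2 cmap], tl.2 ++ [pvLabelAt sl i q.1]))
      ([], [])
      = (PySem.List.enumerate tokens).foldl
      (fun (tl : List String × List (List String)) q =>
        ((fun (a : List String) (q : Int × String) =>
            if !exclude.contains q.2 then a ++ [pvPreProcessToken q.2 cmap] else a) tl.1 q,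
         (fun (a : List (List String)) (q : Int × String) =>
            if !exclude.contains q.2 then a ++ [pvLabelAt sl i q.1] else a) tl.2 q))
      ([], []) := by
    apply PySem.List.foldl_congr_mem
    intro acc q _
    by_cases hq : q.2 ∈ exclude <;> simp [hq]
  rw [h1, PySem.List.foldl_prod_mk
        (f := fun (a : List String) (q : Int × String) =>
          if !exclude.contains q.2 then a ++ [pvPreProcessToken q.2 cmap] else a)
        (g := fun (a : List (List String)) (q : Int × String) =>
          if !exclude.contains q.2 then a ++ [pvLabelAt sl i q.1] else a),
      PySem.List.foldl_append_if, PySem.List.foldl_append_if]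
  simp

-- the whole equivalence with exclude/cmap as plain lists
theorem pv_main (st : List (List String)) (sl : List (List (List String)))
    (exclude : List String) (cmap : List (String × String)) :
    (PySem.List.enumerate st).foldl
      (fun (acc : List (List String) × List (List (List String))) p =>
        let inner :=
          (PySem.List.enumerate p.2).foldl
            (fun (tl : List String × List (List String)) q =>
              if exclude.contains q.2 then tl
              else (tl.1 ++ [pvPreProcessToken q.2 cmap], tl.2 ++ [pvLabelAt sl p.1 q.1]))
            ([], [])
        (acc.1 ++ [inner.1], acc.2 ++ [inner.2]))
      ([], [])
    = (PySem.List.enumerate st).foldl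
      (fun (acc : List (List String) × List (List (List String))) p =>
        (acc.1 ++ [(p.2.filter (fun t => !exclude.contains t)).map
                     (fun t => ((pvMemo st exclude cmap).get? t).getD "")],
         acc.2 ++ [((PySem.List.enumerate p.2).filter (fun q => !exclude.contains q.2)).map
                     (fun q => pvLabelAt sl p.1 q.1)]))
      ([], []) := by
  apply PySem.List.foldl_congr_mem
  intro acc p hp
  obtain ⟨k, hk, rfl⟩ := (PySem.List.mem_enumerate_iff _ _ _).mp hp
  have hrow : st[k] ∈ st := List.getElem_mem hk
  simp only [pvRowA_eq]
  refine congrArg₂ _ (congrArg (acc.1 ++ [·]) ?_) rfl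
  rw [pvFilter_enumerate_map st[k] 0 (fun t => !exclude.contains t)
        (fun t => pvPreProcessToken t cmap)]
  apply List.map_congr_left
  intro t htf
  rw [List.mem_filter] at htf
  rw [pvPreProcess_eq_norm,
      pvMemo_get? st _ _ st[k] t hrow htf.1 (by simpa using htf.2)]
  rfl

-- ===== VERDICT =====
theorem process_spec : Claim_equal_process := by
  intro st sl ex cm _ _
  unfold Spec_process process process_alt
  cases ex <;> cases cm <;> exact pv_main st sl _ _
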